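-- pv_equiv track=rewrite | github.com/REED-MG/obsidian-to-mem | mem_phase3_rebuild.py | split_path_query_fragment
-- ===== SOURCE A (Python) =====
-- from typing import Dict, List, Optional, Set, Tuple
--
-- def split_path_query_fragment(raw: str) -> Tuple[str, str, str]:
--     """
--     Split 'path?query#frag' into (path, query, frag) for local-style URLs.
--     We *only* care about the fragment (heading) here, but this keeps behaviour
--     consistent with your phase 1 script.
--     """
--     in_sq = False
--     in_dq = False
--     q_pos = -1
--     f_pos = -1
--
--     for i, ch in enumerate(raw):
--         if ch == "'" and not in_dq:
--             in_sq = not in_sq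
--         elif ch == '"' and not in_sq:
--             in_dq = not in_dq
--         elif ch == "?" and not in_sq and not in_dq and q_pos == -1 and f_pos == -1:
--             q_pos = i
--         elif ch == "#" and not in_sq and not in_dq and f_pos == -1:
--             f_pos = i
--             break
--
--     if q_pos == -1 and f_pos == -1:
--         return raw, "", ""
--
--     if q_pos != -1 and (f_pos == -1 or q_pos < f_pos):
--         path = raw[:q_pos]
--         frag = raw[f_pos + 1 :] if f_pos != -1 else ""
--         query = raw[q_pos + 1 : (f_pos if f_pos != -1 else None)]
--     else:
--         path = raw[:f_pos]
--         frag = raw[f_pos + 1 :]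
--         query = ""
--
--     return path, query, frag
-- ===== SOURCE B (Python) =====
-- def split_on_first_unquoted(s, delim):
--     in_sq = in_dq = False
--     for i, ch in enumerate(s):
--         if ch == "'" and not in_dq:
--             in_sq = not in_sq
--         elif ch == '"' and not in_sq:
--             in_dq = not in_dq
--         elif ch == delim and not in_sq and not in_dq:
--             return i
--     return None
--
-- def split_path_query_fragment(raw):
--     f = split_on_first_unquoted(raw, '#')
--     if f is None:
--         prefix, frag = raw, ""
--     else:
--         prefix, frag = raw[:f], raw[f + 1:]
--     q = split_on_first_unquoted(prefix, '?')
--     if q is None: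
--         return prefix, "", frag
--     return prefix[:q], prefix[q + 1:], frag
-- ===== Notes on version B (the rewrite author's own statement) =====
-- stated objective: simpler
-- what changed: A's single quadruple-state loop (both sentinels tracked at once, with an early break) is replaced by a reusable one-delimiter helper split_on_first_unquoted, called once for '#' on the whole string and once for '?' on the pre-fragment prefix, with the split assembled from plain slices.
import Mathlib
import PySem

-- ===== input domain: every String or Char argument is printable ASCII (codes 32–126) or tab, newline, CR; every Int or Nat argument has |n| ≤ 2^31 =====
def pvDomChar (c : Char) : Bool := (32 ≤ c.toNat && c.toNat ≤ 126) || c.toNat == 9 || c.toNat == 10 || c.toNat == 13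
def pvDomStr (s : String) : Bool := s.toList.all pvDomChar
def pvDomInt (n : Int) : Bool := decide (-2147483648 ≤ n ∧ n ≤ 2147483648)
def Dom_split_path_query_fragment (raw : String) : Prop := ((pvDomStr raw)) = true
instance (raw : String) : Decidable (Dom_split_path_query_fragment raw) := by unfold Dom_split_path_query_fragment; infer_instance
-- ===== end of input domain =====

-- B replaces A's single 4-state loop by a reusable helper that finds the first unquoted
-- occurrence of one delimiter, called once for '#' and once for '?' (objective: simpler).

-- ===== PORT A =====
-- A's for-loop with early break: state (in_sq, in_dq, q_pos, f_pos), index i.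
def pvLoopA : List Char → Bool → Bool → Int → Int → Nat → Int × Int
  | [], _, _, q, f, _ => (q, f)
  | c :: cs, sq, dq, q, f, i =>
    if c == '\'' && !dq then pvLoopA cs (!sq) dq q f (i + 1)
    else if c == '"' && !sq then pvLoopA cs sq (!dq) q f (i + 1)
    else if c == '?' && !sq && !dq && q == -1 && f == -1 then pvLoopA cs sq dq (i : Int) f (i + 1)
    else if c == '#' && !sq && !dq && f == -1 then (q, (i : Int))  -- break
    else pvLoopA cs sq dq q f (i + 1)

def split_path_query_fragment (raw : String) : String × String × String :=
  let cs := raw.toList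
  let qf := pvLoopA cs false false (-1) (-1) 0
  let q_pos := qf.1
  let f_pos := qf.2
  if q_pos = -1 ∧ f_pos = -1 then (raw, "", "")
  else if q_pos ≠ -1 ∧ (f_pos = -1 ∨ q_pos < f_pos) then
    let path := String.mk (PySem.List.slice cs none (some q_pos))
    let frag := if f_pos ≠ -1 then String.mk (PySem.List.slice cs (some (f_pos + 1)) none) else ""
    let query := String.mk (PySem.List.slice cs (some (q_pos + 1)) (if f_pos ≠ -1 then some f_pos else none))
    (path, query, frag)
  else
    (String.mk (PySem.List.slice cs none (some f_pos)), "",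
     String.mk (PySem.List.slice cs (some (f_pos + 1)) none))

-- ===== PORT B =====
-- split_on_first_unquoted: index of first delim seen with both quote flags off, or none.
def pvFirstUnq (delim : Char) : List Char → Bool → Bool → Nat → Option Nat
  | [], _, _, _ => none
  | c :: cs, sq, dq, i =>
    if c == '\'' && !dq then pvFirstUnq delim cs (!sq) dq (i + 1)
    else if c == '"' && !sq then pvFirstUnq delim cs sq (!dq) (i + 1)
    else if c == delim && !sq && !dq then some i
    else pvFirstUnq delim cs sq dq (i + 1)

def split_path_query_fragment_alt (raw : String) : String × String × String :=
  let cs := raw.toList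
  match pvFirstUnq '#' cs false false 0 with
  | none =>
    match pvFirstUnq '?' cs false false 0 with
    | none => (raw, "", "")
    | some q => (String.mk (cs.take q), String.mk (cs.drop (q + 1)), "")
  | some f =>
    let pre := cs.take f
    let frag := String.mk (cs.drop (f + 1))
    match pvFirstUnq '?' pre false false 0 with
    | none => (String.mk pre, "", frag)
    | some q => (String.mk (pre.take q), String.mk (pre.drop (q + 1)), frag)

-- ===== PRECONDITION & SPEC =====
def Spec_split_path_query_fragment (raw : String) (out : String × String × String) : Prop := out = split_path_query_fragment_alt raw
instance (raw : String) (out : String × String × String) : Decidable (Spec_split_path_query_fragment raw out) := by unfold Spec_split_path_query_fragment; infer_instance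

-- ===== CLAIM (what is proved, stated in full; the proofs are below) =====
def Claim_equal_split_path_query_fragment : Prop := ∀ (raw : String), Dom_split_path_query_fragment raw → Spec_split_path_query_fragment raw (split_path_query_fragment raw)

-- ===== LEMMAS AND PROOFS =====

theorem pvFirstUnq_lt {d : Char} : ∀ (cs : List Char) (sq dq : Bool) (i j : Nat),
    pvFirstUnq d cs sq dq i = some j → j < i + cs.length := by
  intro cs
  induction cs with
  | nil => intro sq dq i j h; simp [pvFirstUnq] at h
  | cons c cs ih =>
    intro sq dq i j h
    simp only [pvFirstUnq] at h
    split_ifs at h with h1 h2 h3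
    · have := ih _ _ _ _ h; simp; omega
    · have := ih _ _ _ _ h; simp; omega
    · cases h; simp
    · have := ih _ _ _ _ h; simp; omega

theorem pvFirstUnq_le {d : Char} : ∀ (cs : List Char) (sq dq : Bool) (i j : Nat),
    pvFirstUnq d cs sq dq i = some j → i ≤ j := by
  intro cs
  induction cs with
  | nil => intro sq dq i j h; simp [pvFirstUnq] at h
  | cons c cs ih =>
    intro sq dq i j h
    simp only [pvFirstUnq] at h
    split_ifs at h with h1 h2 h3
    · exact Nat.le_of_succ_le (ih _ _ _ _ h)
    · exact Nat.le_of_succ_le (ih _ _ _ _ h)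
    · cases h; omega
    · exact Nat.le_of_succ_le (ih _ _ _ _ h)

theorem pvLoopA_q_set : ∀ (cs : List Char) (sq dq : Bool) (q : Int) (i : Nat), q ≠ -1 →
    pvLoopA cs sq dq q (-1) i =
      (match pvFirstUnq '#' cs sq dq i with
       | none => (q, -1)
       | some f => (q, (f : Int))) := by
  intro cs
  induction cs with
  | nil => intro sq dq q i hq; simp [pvLoopA, pvFirstUnq]
  | cons c cs ih =>
    intro sq dq q i hq
    have hq' : (q == -1) = false := by simp [hq]
    by_cases h1 : (c == '\'' && !dq) = true
    · simp only [pvLoopA, pvFirstUnq, h1, if_true]; exact ih _ _ _ _ hq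
    · by_cases h2 : (c == '"' && !sq) = true
      · simp only [pvLoopA, pvFirstUnq, h1, h2, if_true, Bool.false_eq_true, if_false]
        exact ih _ _ _ _ hq
      · by_cases h3 : (c == '#' && !sq && !dq) = true
        · simp [pvLoopA, pvFirstUnq, h1, h2, h3, hq']
        · simp only [pvLoopA, pvFirstUnq, h1, h2, h3, hq', Bool.and_false, Bool.false_and,
            Bool.false_eq_true, if_false]
          exact ih _ _ _ _ hq

def pvOInt : Option Nat → Int
  | none => -1
  | some j => (j : Int)

theorem pvLoopA_eq : ∀ (cs : List Char) (sq dq : Bool) (i : Nat),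
    pvLoopA cs sq dq (-1) (-1) i =
      (match pvFirstUnq '#' cs sq dq i with
       | none => (pvOInt (pvFirstUnq '?' cs sq dq i), -1)
       | some f => (pvOInt (pvFirstUnq '?' (cs.take (f - i)) sq dq i), (f : Int))) := by
  intro cs
  induction cs with
  | nil => intro sq dq i; simp [pvLoopA, pvFirstUnq, pvOInt]
  | cons c cs ih =>
    intro sq dq i
    by_cases h1 : (c == '\'' && !dq) = true
    · simp only [pvLoopA, pvFirstUnq, h1, if_true]
      rw [ih]
      cases hf : pvFirstUnq '#' cs (!sq) dq (i + 1) with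
      | none => rfl
      | some f =>
        have hle := pvFirstUnq_le cs (!sq) dq (i+1) f hf
        have htake : (c :: cs).take (f - i) = c :: cs.take (f - (i + 1)) := by
          have h : f - i = (f - (i+1)) + 1 := by omega
          rw [h]; rfl
        simp only [htake, pvFirstUnq, h1, if_true]
    · by_cases h2 : (c == '"' && !sq) = true
      · simp only [pvLoopA, pvFirstUnq, h1, h2, if_true, Bool.false_eq_true, if_false]
        rw [ih]
        cases hf : pvFirstUnq '#' cs sq (!dq) (i + 1) with
        | none => rfl
        | some f =>
          have hle := pvFirstUnq_le cs sq (!dq) (i+1) f hf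
          have htake : (c :: cs).take (f - i) = c :: cs.take (f - (i + 1)) := by
            have h : f - i = (f - (i+1)) + 1 := by omega
            rw [h]; rfl
          simp only [htake, pvFirstUnq, h1, h2, if_true, Bool.false_eq_true, if_false]
      · by_cases h3 : (c == '?' && !sq && !dq) = true
        · have hch : c = '?' := by simp_all
          have hnh : (c == '#' && !sq && !dq) = false := by simp [hch]
          simp only [pvLoopA, pvFirstUnq, h1, h2, h3, hnh, Bool.false_and, Bool.true_and, Bool.false_eq_true, if_false, if_true]
          rw [pvLoopA_q_set cs sq dq (i : Int) (i+1) (by omega)]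
          cases hf : pvFirstUnq '#' cs sq dq (i + 1) with
          | none => simp [pvOInt]
          | some f =>
            have hle := pvFirstUnq_le cs sq dq (i+1) f hf
            have htake : (c :: cs).take (f - i) = c :: cs.take (f - (i + 1)) := by
              have h : f - i = (f - (i+1)) + 1 := by omega
              rw [h]; rfl
            simp [htake, pvFirstUnq, h1, h2, h3, pvOInt]
        · by_cases h4 : (c == '#' && !sq && !dq) = true
          · simp [pvLoopA, pvFirstUnq, h1, h2, h3, h4, pvOInt]
          · simp only [pvLoopA, pvFirstUnq, h1, h2, h3, h4, Bool.false_and,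
              Bool.false_eq_true, if_false]
            rw [ih]
            cases hf : pvFirstUnq '#' cs sq dq (i + 1) with
            | none => rfl
            | some f =>
              have hle := pvFirstUnq_le cs sq dq (i+1) f hf
              have htake : (c :: cs).take (f - i) = c :: cs.take (f - (i + 1)) := by
                have h : f - i = (f - (i+1)) + 1 := by omega
                rw [h]; rfl
              simp only [htake, pvFirstUnq, h1, h2, h3, Bool.false_eq_true, if_false]

-- ===== VERDICT (by name: the statement is the Claim_ definition above) =====
theorem split_path_query_fragment_spec : Claim_equal_split_path_query_fragment := by
  intro raw _
  unfold Spec_split_path_query_fragment split_path_query_fragment split_path_query_fragment_alt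
  simp only [pvLoopA_eq raw.toList false false 0]
  cases hf : pvFirstUnq '#' raw.toList false false 0 with
  | none =>
    cases hq : pvFirstUnq '?' raw.toList false false 0 with
    | none => simp [pvOInt]
    | some q =>
      simp only [pvOInt]
      have hq0 : ¬((q : Int) = -1 ∧ (-1 : Int) = -1) := by omega
      have hq1 : (q : Int) ≠ -1 ∧ ((-1 : Int) = -1 ∨ (q : Int) < -1) := by omega
      have hc1 : ((q : Int) + 1) = ((q + 1 : Nat) : Int) := by push_cast; ring
      simp [hq1]
      simp only [hc1, PySem.List.slice_from_natCast]
  | some f =>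
    simp only [Nat.sub_zero]
    cases hq : pvFirstUnq '?' (raw.toList.take f) false false 0 with
    | none =>
      simp only [pvOInt]
      have h0 : ¬((-1 : Int) = -1 ∧ (f : Int) = -1) := by omega
      have h1 : ¬((-1 : Int) ≠ -1 ∧ ((f : Int) = -1 ∨ (-1 : Int) < (f : Int))) :=
        fun h => h.1 rfl
      have hcf : ((f : Int) + 1) = ((f + 1 : Nat) : Int) := by push_cast; ring
      simp
      simp only [hcf, PySem.List.slice_from_natCast]
    | some q =>
      have hlt : q < f := by
        have h := pvFirstUnq_lt (raw.toList.take f) false false 0 q hq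
        have h2 : q < (raw.toList.take f).length := by omega
        simp [List.length_take] at h2; omega
      simp only [pvOInt]
      have h0 : ¬((q : Int) = -1 ∧ (f : Int) = -1) := by omega
      have h1 : (q : Int) ≠ -1 ∧ ((f : Int) = -1 ∨ (q : Int) < (f : Int)) :=
        ⟨by omega, Or.inr (by exact_mod_cast hlt)⟩
      have hfne : (f : Int) ≠ -1 := by omega
      have hc1 : ((q : Int) + 1) = ((q + 1 : Nat) : Int) := by push_cast; ring
      have hcf : ((f : Int) + 1) = ((f + 1 : Nat) : Int) := by push_cast; ring
      have hmin : min q f = q := Nat.min_eq_left (Nat.le_of_lt hlt)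
      simp [h1, hfne]
      simp only [hc1, hcf, PySem.List.slice_natCast,
        PySem.List.slice_from_natCast, List.take_take, List.drop_take, hmin]
      simp
      intro hle
      exact absurd hlt (by omega)
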